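-- pv_equiv track=rewrite | github.com/cnxw4570123/Problem-Solving | 프로그래머스/2/150368. 이모티콘 할인행사/이모티콘 할인행사.py | solution
-- ===== SOURCE A (Python) =====
-- from itertools import product
--
-- def solution(users, emoticons):
--     answer = [0, 0]
--     for row in product([10, 20, 30, 40], repeat = len(emoticons)):
--         subscribers, margin = calculate(row, emoticons, users)
--         if subscribers > answer[0]:
--             answer = [subscribers, margin]
--             continue
--         if subscribers == answer[0]:
--             answer[1] = max(answer[1], margin)
--
--
--     return answer
--
-- def calculate(row, emoticons, users):
--     subscribers, margin = 0, 0
--     for min_sale, min_price in users: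
--         total_price = 0
--         for i in range(len(emoticons)):
--             if row[i] < min_sale:
--                 continue
--             total_price += (100 - row[i]) * emoticons[i] // 100
--
--         if total_price >= min_price:
--             subscribers += 1
--             continue
--
--         margin += total_price
--
--     return subscribers, margin
-- ===== SOURCE B (Python) =====
-- def solution(users, emoticons):
--     # DFS over discounts, threading per-user accumulated totals incrementally.
--     def leaf(totals):
--         subs, margin = 0, 0
--         for (min_sale, min_price), t in zip(users, totals):
--             if t >= min_price:
--                 subs += 1
--             else:
--                 margin += t
--         return (subs, margin)
--
--     def better(x, y):
--         return x if x >= y else y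
--
--     def dfs(rest, totals):
--         if not rest:
--             return leaf(totals)
--         e = rest[0]
--         best = None
--         for d in (10, 20, 30, 40):
--             nt = [t + ((100 - d) * e // 100 if d >= ms else 0)
--                   for (ms, mp), t in zip(users, totals)]
--             r = dfs(rest[1:], nt)
--             best = r if best is None else better(best, r)
--         return best
--
--     b = better((0, 0), dfs(list(emoticons), [0] * len(users)))
--     return [b[0], b[1]]
-- ===== Notes on version B (the rewrite author's own statement) =====
-- stated objective: alternative
-- what changed: Replaces the itertools.product enumeration with a full calculate() rescan per combination by a backtracking DFS that assigns one discount per depth and threads a per-user list of accumulated totals incrementally, counting subscribers/margin only at the leaves and folding the best (subscribers, margin) pair lexicographically.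
-- outside the precondition, e.g. on solution([[10]], [100]): A raises ValueError, B raises ValueError
import Mathlib
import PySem

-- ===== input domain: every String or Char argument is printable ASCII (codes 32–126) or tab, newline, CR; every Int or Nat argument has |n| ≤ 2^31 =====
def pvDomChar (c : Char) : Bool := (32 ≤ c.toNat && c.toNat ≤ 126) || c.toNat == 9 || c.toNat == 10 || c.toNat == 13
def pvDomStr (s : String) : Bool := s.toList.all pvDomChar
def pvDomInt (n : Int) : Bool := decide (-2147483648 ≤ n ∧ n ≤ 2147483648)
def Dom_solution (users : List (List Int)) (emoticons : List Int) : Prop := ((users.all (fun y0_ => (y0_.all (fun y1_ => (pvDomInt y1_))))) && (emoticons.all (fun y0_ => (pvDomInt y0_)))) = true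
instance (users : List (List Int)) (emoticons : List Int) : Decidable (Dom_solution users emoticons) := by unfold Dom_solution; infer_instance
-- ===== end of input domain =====

-- B replaces A's itertools.product enumeration with full per-combination rescans by a
-- backtracking DFS that threads per-user accumulated totals incrementally (alternative decomposition).

-- ===== PORT A =====
-- itertools.product([10,20,30,40], repeat = n), in product's order (leftmost varies slowest)
def pvRows : Nat → List (List Int)
  | 0 => [[]]
  | n + 1 => [(10 : Int), 20, 30, 40].flatMap (fun d => (pvRows n).map (fun r => d :: r))

-- calculate(row, emoticons, users)
def pvCalc (row emoticons : List Int) (users : List (List Int)) : Int × Int :=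
  users.foldl (fun (sm : Int × Int) u =>
    let min_sale := PySem.List.pyGetD u 0 0
    let min_price := PySem.List.pyGetD u 1 0
    let total_price := (PySem.List.pyRange 0 (emoticons.length : Int) 1).foldl
      (fun tp i =>
        if PySem.List.pyGetD row i 0 < min_sale then tp
        else tp + PySem.Int.floordiv ((100 - PySem.List.pyGetD row i 0) * PySem.List.pyGetD emoticons i 0) 100) 0
    if total_price ≥ min_price then (sm.1 + 1, sm.2) else (sm.1, sm.2 + total_price)) (0, 0)

def solution (users : List (List Int)) (emoticons : List Int) : List Int :=
  let ans := (pvRows emoticons.length).foldl (fun (a : Int × Int) row =>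
    let c := pvCalc row emoticons users
    if c.1 > a.1 then c
    else if c.1 = a.1 then (a.1, max a.2 c.2)
    else a) (0, 0)
  [ans.1, ans.2]

-- ===== PORT B =====
-- better(x, y) = x if x >= y else y  (Python tuple comparison is lexicographic)
def pvBetter (x y : Int × Int) : Int × Int :=
  if x.1 > y.1 ∨ (x.1 = y.1 ∧ x.2 ≥ y.2) then x else y

-- leaf(totals)
def pvLeaf (users : List (List Int)) (totals : List Int) : Int × Int :=
  (users.zip totals).foldl (fun (sm : Int × Int) ut =>
    if ut.2 ≥ PySem.List.pyGetD ut.1 1 0 then (sm.1 + 1, sm.2) else (sm.1, sm.2 + ut.2)) (0, 0)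

-- nt = [t + ((100-d)*e//100 if d >= ms else 0) for (ms, mp), t in zip(users, totals)]
def pvStep (users : List (List Int)) (totals : List Int) (d e : Int) : List Int :=
  (users.zip totals).map (fun ut =>
    ut.2 + if d ≥ PySem.List.pyGetD ut.1 0 0 then PySem.Int.floordiv ((100 - d) * e) 100 else 0)

-- dfs(rest, totals), the d-loop unrolled over (10, 20, 30, 40)
def pvDfs (users : List (List Int)) : List Int → List Int → Int × Int
  | [], totals => pvLeaf users totals
  | e :: rest, totals =>
    let r1 := pvDfs users rest (pvStep users totals 10 e)
    let r2 := pvDfs users rest (pvStep users totals 20 e)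
    let r3 := pvDfs users rest (pvStep users totals 30 e)
    let r4 := pvDfs users rest (pvStep users totals 40 e)
    pvBetter (pvBetter (pvBetter r1 r2) r3) r4

def solution_alt (users : List (List Int)) (emoticons : List Int) : List Int :=
  let b := pvBetter (0, 0) (pvDfs users emoticons (users.map (fun _ => (0 : Int))))
  [b.1, b.2]

-- ===== PRECONDITION & SPEC =====
-- Pre_ excludes users containing a row whose length is not 2: there Python's tuple
-- unpacking 'min_sale, min_price' raises ValueError (in A and in B alike).
def Pre_solution (users : List (List Int)) (emoticons : List Int) : Prop :=
  (users.all (fun u => u.length == 2)) = true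
instance (users : List (List Int)) (emoticons : List Int) : Decidable (Pre_solution users emoticons) := by unfold Pre_solution; infer_instance

def pvWitness_solution : List (List Int) × List Int := ([[40, 100], [10, 20]], [7, 9])

def Spec_solution (users : List (List Int)) (emoticons : List Int) (out : List Int) : Prop := out = solution_alt users emoticons
instance (users : List (List Int)) (emoticons : List Int) (out : List Int) : Decidable (Spec_solution users emoticons out) := by unfold Spec_solution; infer_instance

-- ===== CLAIM (what is proved, stated in full; the proofs are below) =====
def Claim_equal_solution : Prop := ∀ (users : List (List Int)) (emoticons : List Int), Dom_solution users emoticons → Pre_solution users emoticons → Spec_solution users emoticons (solution users emoticons)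

-- ===== LEMMAS AND PROOFS =====

theorem pvBetter_assoc (x y z : Int × Int) :
    pvBetter (pvBetter x y) z = pvBetter x (pvBetter y z) := by
  rcases x with ⟨x1, x2⟩; rcases y with ⟨y1, y2⟩; rcases z with ⟨z1, z2⟩
  simp only [pvBetter]
  split_ifs <;> first | rfl | (exfalso; omega)

-- A's update of 'answer' is exactly the lexicographic max 'better'
theorem pvUpd_eq (a c : Int × Int) :
    (if c.1 > a.1 then c else if c.1 = a.1 then (a.1, max a.2 c.2) else a) = pvBetter a c := by
  rcases a with ⟨a1, a2⟩; rcases c with ⟨c1, c2⟩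
  simp only [pvBetter]
  split_ifs <;> first | rfl | (exfalso; omega) | (exact Prod.ext (by omega) (by omega))

-- the inner-loop body of A, as a fold over the zipped (row, emoticons) pairs
def pvInnerZ (pairs : List (Int × Int)) (ms tp : Int) : Int :=
  pairs.foldl (fun tp de =>
    if de.1 < ms then tp else tp + PySem.Int.floordiv ((100 - de.1) * de.2) 100) tp

theorem pvInnerZ_cons (p : Int × Int) (ps : List (Int × Int)) (ms tp : Int) :
    pvInnerZ (p :: ps) ms tp
      = pvInnerZ ps ms (if p.1 < ms then tp else tp + PySem.Int.floordiv ((100 - p.1) * p.2) 100) := rfl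

theorem pvInnerZ_add (pairs : List (Int × Int)) (ms a tp : Int) :
    pvInnerZ pairs ms (a + tp) = a + pvInnerZ pairs ms tp := by
  induction pairs generalizing tp with
  | nil => rfl
  | cons p ps ih =>
    simp only [pvInnerZ, List.foldl_cons] at *
    split_ifs
    · exact ih tp
    · rw [add_assoc]; exact ih _

-- A's index loop over range(len(emoticons)) equals the fold over the zipped lists
theorem pvInner_eq (emoticons : List Int) : ∀ (row : List Int) (ms tp : Int),
    row.length = emoticons.length →
    (List.range emoticons.length).foldl
      (fun tp (k : Nat) =>
        if PySem.List.pyGetD row (k : Int) 0 < ms then tp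
        else tp + PySem.Int.floordiv ((100 - PySem.List.pyGetD row (k : Int) 0) * PySem.List.pyGetD emoticons (k : Int) 0) 100) tp
      = pvInnerZ (row.zip emoticons) ms tp := by
  induction emoticons with
  | nil => intro row ms tp h; simp [pvInnerZ]
  | cons e em ih =>
    intro row ms tp h
    cases row with
    | nil => simp at h
    | cons d row' =>
      simp only [List.length_cons] at h ⊢
      rw [List.range_succ_eq_map, List.foldl_cons, List.foldl_map]
      simp only [Nat.cast_zero, PySem.List.pyGetD_zero_cons, List.zip_cons_cons, pvInnerZ_cons]
      rw [← ih row' ms _ (by omega)]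
      apply PySem.List.foldl_congr_mem
      intro acc x _
      have h1 : ∀ (l : List Int) (y : Int),
          PySem.List.pyGetD (y :: l) ((Nat.succ x : Nat) : Int) 0 = PySem.List.pyGetD l (x : Int) 0 := by
        intro l y
        rw [PySem.List.pyGetD_natCast, PySem.List.pyGetD_natCast]
        rfl
      rw [h1, h1]

-- zip with a map of the same zip
theorem pvZipMap (users : List (List Int)) : ∀ (totals : List Int) (f : List Int × Int → Int),
    users.zip ((users.zip totals).map f) = (users.zip totals).map (fun ut => (ut.1, f ut)) := by
  induction users with
  | nil => intro totals f; simp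
  | cons u us ih =>
    intro totals f
    cases totals with
    | nil => simp
    | cons t ts => simp [ih ts]

theorem pvMapSnd : ∀ (us : List (List Int)) (ts : List Int), ts.length = us.length →
    (us.zip ts).map (fun ut => ut.2) = ts := by
  intro us
  induction us with
  | nil => intro ts h; cases ts <;> simp_all
  | cons u us ih =>
    intro ts h
    cases ts with
    | nil => simp at h
    | cons t ts' => simp only [List.length_cons] at h; simp [ih ts' (by omega)]

theorem pvStep_length (users : List (List Int)) (totals : List Int) (d e : Int) :
    (pvStep users totals d e).length = min users.length totals.length := by
  simp [pvStep]

-- the totals list threaded through the DFS along a fixed row of discounts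
def pvStepAll (users : List (List Int)) (totals : List Int) : List Int → List Int → List Int
  | d :: row', e :: em' => pvStepAll users (pvStep users totals d e) row' em'
  | _, _ => totals

theorem pvStepAll_eq (users : List (List Int)) : ∀ (row em totals : List Int),
    row.length = em.length → totals.length = users.length →
    pvStepAll users totals row em
      = (users.zip totals).map
          (fun ut => ut.2 + pvInnerZ (row.zip em) (PySem.List.pyGetD ut.1 0 0) 0) := by
  intro row
  induction row with
  | nil =>
    intro em totals hr ht
    cases em with
    | nil =>
      simp only [pvStepAll, List.zip_nil_right, pvInnerZ, List.foldl_nil, add_zero]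
      exact (pvMapSnd users totals ht).symm
    | cons e em' => simp at hr
  | cons d row' ih =>
    intro em totals hr ht
    cases em with
    | nil => simp at hr
    | cons e em' =>
      simp only [List.length_cons] at hr
      have hlen : (pvStep users totals d e).length = users.length := by
        rw [pvStep_length]; omega
      show pvStepAll users (pvStep users totals d e) row' em' = _
      rw [ih em' _ (by omega) hlen]
      conv_lhs => rw [pvStep, pvZipMap, List.map_map]
      apply List.map_congr_left
      intro ut _
      simp only [Function.comp_apply, List.zip_cons_cons, pvInnerZ_cons]
      by_cases hms : d < PySem.List.pyGetD ut.1 0 0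
      · rw [if_neg (by omega), if_pos hms]
        simp
      · rw [if_pos (show d ≥ PySem.List.pyGetD ut.1 0 0 by omega), if_neg hms, zero_add]
        have ha := pvInnerZ_add (row'.zip em') (PySem.List.pyGetD ut.1 0 0)
          (PySem.Int.floordiv ((100 - d) * e) 100) 0
        rw [add_zero] at ha
        rw [ha]; ring

theorem pvRows_length (n : Nat) : ∀ r ∈ pvRows n, r.length = n := by
  induction n with
  | zero => simp [pvRows]
  | succ m ih =>
    intro r hr
    simp only [pvRows, List.mem_flatMap, List.mem_map] at hr
    obtain ⟨d, _, r', hr', rfl⟩ := hr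
    simp [ih r' hr']

-- the DFS computes the lexicographic max of the leaves over all discount rows
theorem pvDfs_eq (users : List (List Int)) : ∀ (rest totals : List Int) (a : Int × Int),
    totals.length = users.length →
    ((pvRows rest.length).map
      (fun row => pvLeaf users (pvStepAll users totals row rest))).foldl pvBetter a
      = pvBetter a (pvDfs users rest totals) := by
  intro rest
  induction rest with
  | nil => intro totals a ht; simp [pvRows, pvStepAll, pvDfs]
  | cons e rest' ih =>
    intro totals a ht
    have hlen : ∀ d : Int, (pvStep users totals d e).length = users.length := by
      intro d; rw [pvStep_length]; omega
    have hone : ∀ (d : Int),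
        List.map (fun row => pvLeaf users (pvStepAll users totals row (e :: rest')))
          (List.map (fun r => d :: r) (pvRows rest'.length))
          = List.map (fun row => pvLeaf users (pvStepAll users (pvStep users totals d e) row rest'))
            (pvRows rest'.length) := by
      intro d
      rw [List.map_map]
      apply List.map_congr_left
      intro r _
      rfl
    simp only [List.length_cons, pvRows, List.flatMap_cons, List.flatMap_nil,
      List.append_nil, List.map_append, List.foldl_append]
    rw [hone 10, hone 20, hone 30, hone 40,
      ih _ a (hlen 10), ih _ _ (hlen 20), ih _ _ (hlen 30), ih _ _ (hlen 40)]
    simp only [pvDfs, pvBetter_assoc]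

-- A's calculate equals B's leaf applied to the threaded totals
theorem pvCalc_eq (users : List (List Int)) (emoticons row : List Int)
    (hr : row.length = emoticons.length) :
    pvCalc row emoticons users
      = pvLeaf users (pvStepAll users (users.map (fun _ => (0 : Int))) row emoticons) := by
  have hzg : ∀ (g : List Int → Int) (l : List (List Int)),
      l.zip (l.map g) = l.map (fun u => (u, g u)) := by
    intro g l
    induction l with
    | nil => simp
    | cons x xs ihz => simp only [List.map_cons, List.zip_cons_cons, ihz]
  rw [pvStepAll_eq users row emoticons _ hr (by simp), hzg, List.map_map, pvLeaf, hzg,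
    List.foldl_map, pvCalc]
  apply PySem.List.foldl_congr_mem
  intro sm u _
  simp only [Function.comp_apply, zero_add]
  have hp : PySem.List.pyRange 0 (emoticons.length : Int) 1
      = (List.range emoticons.length).map (fun (k : Nat) => (k : Int)) := by
    rw [PySem.List.pyRange_one]
    have h0 : ((emoticons.length : Int) - 0).toNat = emoticons.length := by omega
    rw [h0]
    apply List.map_congr_left
    intro k _
    exact zero_add _
  rw [hp, List.foldl_map, pvInner_eq emoticons row _ 0 hr]

-- ===== VERDICT (by name: the statement is the Claim_ definition above) =====
theorem solution_spec : Claim_equal_solution := by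
  intro users emoticons _ _
  show solution users emoticons = solution_alt users emoticons
  unfold solution solution_alt
  have hupd : (fun (a : Int × Int) row =>
      let c := pvCalc row emoticons users
      if c.1 > a.1 then c
      else if c.1 = a.1 then (a.1, max a.2 c.2)
      else a) = fun a row => pvBetter a (pvCalc row emoticons users) := by
    funext a row
    exact pvUpd_eq a (pvCalc row emoticons users)
  rw [hupd, ← List.foldl_map (f := fun row => pvCalc row emoticons users) (g := pvBetter)]
  rw [List.map_congr_left (fun r hr => pvCalc_eq users emoticons r (pvRows_length _ r hr))]
  rw [pvDfs_eq users emoticons (users.map (fun _ => (0 : Int))) (0, 0) (by simp)]
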